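-- pv_equiv track=rewrite | github.com/fameu/checkio | find-sequence.py | checkioMe
-- ===== SOURCE A (Python) =====
-- def checkioMe(matrix):
--     #replace this for solution
--     n = len(matrix)
--     for i in range(n):
--         for j in range(n):
--             l1 = [matrix[i][j+k] for k in range(4) if j+k < n]
--             l2 = [matrix[i+k][j] for k in range(4) if i+k < n]
--             l3 = [matrix[i+k][j+k] for k in range(4) if i+k <n and j+k<n]
--             l4 = [matrix[i-k][j+k] for k in range(4) if j+k <n and i-k>=0]
--             if len(set(l1)) == 1 and len(l1) == 4:
--                 return True
--             if len(set(l2)) == 1 and len(l2) == 4: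
--                 return True
--             if len(set(l3)) == 1 and len(l3) == 4:
--                 return True
--             if len(set(l4)) == 1 and len(l4) == 4:
--                 return True
--     return False
-- ===== SOURCE B (Python) =====
-- def checkioMe(matrix):
--     n = len(matrix)
--
--     def has_run(line):
--         # run-length scan: count of consecutive equal elements ending here
--         count = 0
--         prev = None
--         for x in line:
--             count = count + 1 if count > 0 and x == prev else 1
--             if count >= 4:
--                 return True
--             prev = x
--         return False
--
--     lines = []
--     for i in range(n):
--         lines.append([matrix[i][j] for j in range(n)])                          # rows
--     for j in range(n):
--         lines.append([matrix[i][j] for i in range(n)])                          # columns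
--     for s in range(2 * n - 1):
--         lines.append([matrix[i][i - s + n - 1] for i in range(n) if 0 <= i - s + n - 1 < n])  # down-right diagonals
--         lines.append([matrix[i][s - i] for i in range(n) if 0 <= s - i < n])                   # up-right diagonals
--     return any(has_run(line) for line in lines)
-- ===== Notes on version B (the rewrite author's own statement) =====
-- stated objective: alternative
-- what changed: A tests, at every cell, four sliced 4-windows via set-uniqueness checks; B extracts each row, column and diagonal once and does a single run-length scan per line.
import Mathlib
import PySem

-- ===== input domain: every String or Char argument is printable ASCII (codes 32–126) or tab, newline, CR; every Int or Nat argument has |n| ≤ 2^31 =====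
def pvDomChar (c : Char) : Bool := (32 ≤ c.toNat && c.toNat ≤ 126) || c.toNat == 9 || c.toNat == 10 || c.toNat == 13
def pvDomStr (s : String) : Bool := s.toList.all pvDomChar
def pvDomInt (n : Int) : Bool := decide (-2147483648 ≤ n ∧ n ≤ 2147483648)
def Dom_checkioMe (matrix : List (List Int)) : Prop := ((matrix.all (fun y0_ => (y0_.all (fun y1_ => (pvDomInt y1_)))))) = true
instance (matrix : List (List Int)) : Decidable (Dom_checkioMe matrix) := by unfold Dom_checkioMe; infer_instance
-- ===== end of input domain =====

-- B replaces A's per-cell 4-window slicing + set tests by extracting every row/column/diagonal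
-- once and doing a single run-length scan over each line (objective: alternative decomposition).

-- shared cell access: matrix[i][j]; exact on Pre_ (indices in range there)
def cell (matrix : List (List Int)) (i j : Int) : Int :=
  PySem.List.pyGetD (PySem.List.pyGetD matrix i []) j 0

-- ===== PORT A =====
-- the body of A's double loop at (i, j): build l1..l4 and test each
def windowA (matrix : List (List Int)) (n i j : Int) : Bool :=
  let l1 := ((PySem.List.pyRange 0 4 1).filter (fun k => decide (j + k < n))).map
              (fun k => cell matrix i (j + k))
  let l2 := ((PySem.List.pyRange 0 4 1).filter (fun k => decide (i + k < n))).map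
              (fun k => cell matrix (i + k) j)
  let l3 := ((PySem.List.pyRange 0 4 1).filter (fun k => decide (i + k < n) && decide (j + k < n))).map
              (fun k => cell matrix (i + k) (j + k))
  let l4 := ((PySem.List.pyRange 0 4 1).filter (fun k => decide (j + k < n) && decide (i - k ≥ 0))).map
              (fun k => cell matrix (i - k) (j + k))
  if PySem.Set.len (PySem.Set.ofList l1) == 1 && l1.length == 4 then true
  else if PySem.Set.len (PySem.Set.ofList l2) == 1 && l2.length == 4 then true
  else if PySem.Set.len (PySem.Set.ofList l3) == 1 && l3.length == 4 then true
  else if PySem.Set.len (PySem.Set.ofList l4) == 1 && l4.length == 4 then true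
  else false

def checkioMe (matrix : List (List Int)) : Bool :=
  let n : Int := matrix.length
  (PySem.List.pyRange 0 n 1).any (fun i =>
    (PySem.List.pyRange 0 n 1).any (fun j => windowA matrix n i j))

-- ===== PORT B =====
-- run-length scan of one line: count of consecutive equal elements ending at the current one
def hasRunGo : List Int → Int → Option Int → Bool
  | [], _, _ => false
  | x :: xs, count, prev =>
    let c := if count > 0 && prev == some x then count + 1 else 1
    if c ≥ 4 then true else hasRunGo xs c (some x)

def hasRun (line : List Int) : Bool := hasRunGo line 0 none

def rowLine (matrix : List (List Int)) (n i : Int) : List Int :=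
  (PySem.List.pyRange 0 n 1).map (fun j => cell matrix i j)

def colLine (matrix : List (List Int)) (n j : Int) : List Int :=
  (PySem.List.pyRange 0 n 1).map (fun i => cell matrix i j)

def diagLine (matrix : List (List Int)) (n s : Int) : List Int :=
  ((PySem.List.pyRange 0 n 1).filter
      (fun i => decide (0 ≤ i - s + n - 1) && decide (i - s + n - 1 < n))).map
    (fun i => cell matrix i (i - s + n - 1))

def antiLine (matrix : List (List Int)) (n s : Int) : List Int :=
  ((PySem.List.pyRange 0 n 1).filter
      (fun i => decide (0 ≤ s - i) && decide (s - i < n))).map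
    (fun i => cell matrix i (s - i))

def checkioMe_alt (matrix : List (List Int)) : Bool :=
  let n : Int := matrix.length
  let lines : List (List Int) :=
    (PySem.List.pyRange 0 n 1).map (fun i => rowLine matrix n i)
      ++ (PySem.List.pyRange 0 n 1).map (fun j => colLine matrix n j)
      ++ (PySem.List.pyRange 0 (2 * n - 1) 1).flatMap
           (fun s => [diagLine matrix n s, antiLine matrix n s])
  lines.any hasRun

-- ===== PRECONDITION & SPEC =====
-- A indexes matrix[i][j] for all i, j < len(matrix): it raises IndexError on a row shorter than
-- len(matrix) unless it detects a line before reaching that row; Pre_ excludes matrices with such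
-- short rows (B raises there too whenever A does).
def Pre_checkioMe (matrix : List (List Int)) : Prop :=
  ∀ row ∈ matrix, matrix.length ≤ row.length
instance (matrix : List (List Int)) : Decidable (Pre_checkioMe matrix) := by
  unfold Pre_checkioMe; infer_instance
def pvWitness_checkioMe : List (List Int) := [[1, 2], [3, 4]]

def Spec_checkioMe (matrix : List (List Int)) (out : Bool) : Prop := out = checkioMe_alt matrix
instance (matrix : List (List Int)) (out : Bool) : Decidable (Spec_checkioMe matrix out) := by
  unfold Spec_checkioMe; infer_instance

-- ===== CLAIM (what is proved, stated in full; the proofs are below) =====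
def Claim_equal_checkioMe : Prop :=
  ∀ (matrix : List (List Int)), Dom_checkioMe matrix → Pre_checkioMe matrix →
    Spec_checkioMe matrix (checkioMe matrix)

-- ===== LEMMAS AND PROOFS =====

def LC (v : Int) : List Int → Nat
  | [] => 0
  | x :: xs => if x = v then LC v xs + 1 else 0

def Run4 (l : List Int) : Prop :=
  ∃ (k : Nat) (v : Int), l[k]? = some v ∧ l[k+1]? = some v ∧ l[k+2]? = some v ∧ l[k+3]? = some v

theorem LC3 (v : Int) (xs : List Int) :
    3 ≤ LC v xs ↔ xs[0]? = some v ∧ xs[1]? = some v ∧ xs[2]? = some v := by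
  rcases xs with _ | ⟨a, _ | ⟨b, _ | ⟨c, rest⟩⟩⟩ <;>
    simp [LC] <;> split_ifs <;> simp_all

theorem Run4_nil : ¬ Run4 [] := by simp [Run4]

theorem Run4_cons (x : Int) (xs : List Int) :
    Run4 (x :: xs) ↔ (xs[0]? = some x ∧ xs[1]? = some x ∧ xs[2]? = some x) ∨ Run4 xs := by
  constructor
  · rintro ⟨k, v, h0, h1, h2, h3⟩
    match k with
    | 0 =>
      simp only [List.getElem?_cons_zero, Option.some.injEq] at h0
      subst h0
      simp only [List.getElem?_cons_succ] at h1 h2 h3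
      exact Or.inl ⟨h1, h2, h3⟩
    | k + 1 =>
      simp only [List.getElem?_cons_succ] at h0 h1 h2 h3
      exact Or.inr ⟨k, v, h0, h1, h2, h3⟩
  · rintro (⟨h1, h2, h3⟩ | ⟨k, v, h0, h1, h2, h3⟩)
    · exact ⟨0, x, by simp, by simpa using h1, by simpa using h2, by simpa using h3⟩
    · exact ⟨k + 1, v, by simpa using h0, by simpa using h1, by simpa using h2, by simpa using h3⟩

theorem go_spec (xs : List Int) : ∀ (c : Int) (v : Int), 1 ≤ c → c ≤ 3 →
    (hasRunGo xs c (some v) = true ↔ Run4 xs ∨ 4 ≤ c + (LC v xs : Int)) := by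
  induction xs with
  | nil => intro c v h1 h3; simp [hasRunGo, Run4_nil, LC]; omega
  | cons x xs ih =>
    intro c v h1 h3
    by_cases hx : x = v
    · subst hx
      simp only [hasRunGo, show (some x == some x) = true by simp, Bool.and_true,
        decide_eq_true_eq, if_pos (show c > 0 by omega)]
      by_cases h4 : c + 1 ≥ 4
      · rw [if_pos (by omega)]
        simp only [true_iff]
        right
        simp [LC]; omega
      · rw [if_neg (by omega)]
        rw [ih (c + 1) x (by omega) (by omega)]
        rw [Run4_cons, LC]
        simp only [if_pos (rfl : x = x)]
        constructor
        · rintro (h | h)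
          · exact Or.inl (Or.inr h)
          · right; push_cast; omega
        · rintro ((h | h) | h)
          · right
            have : 3 ≤ LC x xs := (LC3 x xs).mpr h
            omega
          · exact Or.inl h
          · right; push_cast at h ⊢; omega
    · have hb : (decide (c > 0) && (some v == some x)) = false := by
        simp [Ne.symm hx]
      simp only [hasRunGo, hb, Bool.false_eq_true, if_false]
      rw [if_neg (by omega : ¬ ((1:Int) ≥ 4))]
      rw [ih 1 x (by omega) (by omega)]
      rw [Run4_cons]
      have hlc : LC v (x :: xs) = 0 := by simp [LC, hx]
      rw [hlc]
      constructor
      · rintro (h | h)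
        · exact Or.inl (Or.inr h)
        · exact Or.inl (Or.inl ((LC3 x xs).mp (by omega)))
      · rintro ((h | h) | h)
        · right
          have : 3 ≤ LC x xs := (LC3 x xs).mpr h
          omega
        · exact Or.inl h
        · simp at h; omega

theorem hasRun_iff (l : List Int) : hasRun l = true ↔ Run4 l := by
  match l with
  | [] => simp [hasRun, hasRunGo, Run4_nil]
  | x :: xs =>
    show hasRunGo (x :: xs) 0 none = true ↔ _
    have hb : (decide ((0:Int) > 0) && ((none : Option Int) == some x)) = false := by simp
    simp only [hasRunGo, hb, Bool.false_eq_true, if_false]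
    rw [if_neg (by omega : ¬ ((1:Int) ≥ 4))]
    rw [go_spec xs 1 x (by omega) (by omega), Run4_cons]
    constructor
    · rintro (h | h)
      · exact Or.inr h
      · exact Or.inl ((LC3 x xs).mp (by omega))
    · rintro (h | h)
      · right
        have : 3 ≤ LC x xs := (LC3 x xs).mpr h
        omega
      · exact Or.inl h

theorem Run4_map_pyRange (f : Int → Int) (lo hi : Int) :
    Run4 ((PySem.List.pyRange lo hi 1).map f) ↔
      ∃ t : Int, lo ≤ t ∧ t + 3 < hi ∧ f (t+1) = f t ∧ f (t+2) = f t ∧ f (t+3) = f t := by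
  constructor
  · rintro ⟨k, v, h0, h1, h2, h3⟩
    simp only [List.getElem?_map, PySem.List.getElem?_pyRange_one] at h0 h1 h2 h3
    split_ifs at h0 h1 h2 h3 with hk0 hk1 hk2 hk3 <;>
      simp_all only [Option.map_some, Option.some.injEq, Option.map_none,
        reduceCtorEq] <;> try exact absurd rfl (by trivial)
    refine ⟨lo + k, by omega, by omega, ?_, ?_, ?_⟩
    · rw [show lo + (k:Int) + 1 = lo + ((k+1 : Nat) : Int) by push_cast; ring, h1, h0]
    · rw [show lo + (k:Int) + 2 = lo + ((k+2 : Nat) : Int) by push_cast; ring, h2, h0]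
    · rw [show lo + (k:Int) + 3 = lo + ((k+3 : Nat) : Int) by push_cast; ring, h3, h0]
  · rintro ⟨t, hlo, hhi, e1, e2, e3⟩
    refine ⟨(t - lo).toNat, f t, ?_, ?_, ?_, ?_⟩ <;>
      simp only [List.getElem?_map, PySem.List.getElem?_pyRange_one] <;>
      rw [if_pos (by omega)] <;> simp only [Option.map_some, Option.some.injEq]
    · rw [show lo + ((t - lo).toNat : Int) = t by omega]
    · rw [show lo + (((t - lo).toNat + 1 : Nat) : Int) = t + 1 by push_cast; omega, e1]
    · rw [show lo + (((t - lo).toNat + 2 : Nat) : Int) = t + 2 by push_cast; omega, e2]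
    · rw [show lo + (((t - lo).toNat + 3 : Nat) : Int) = t + 3 by push_cast; omega, e3]

-- a filter of [0,n) by an interval condition is a pyRange
theorem filter_interval (n A B : Int) (p : Int → Bool)
    (hp : ∀ i, p i = (decide (A ≤ i) && decide (i < B))) :
    (PySem.List.pyRange 0 n 1).filter p = PySem.List.pyRange (max 0 A) (min n B) 1 := by
  by_cases h : min n B ≤ max 0 A
  · rw [PySem.List.pyRange_one_eq_nil h, List.filter_eq_nil_iff]
    intro a ha
    rw [PySem.List.mem_pyRange_one] at ha
    rw [hp]
    simp only [Bool.and_eq_true, decide_eq_true_eq, not_and]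
    omega
  · push_neg at h
    rw [PySem.List.pyRange_one_append 0 (max 0 A) n (by omega) (by omega),
        PySem.List.pyRange_one_append (max 0 A) (min n B) n (by omega) (by omega),
        List.filter_append, List.filter_append]
    rw [List.filter_eq_nil_iff.mpr (fun a ha => by
      rw [PySem.List.mem_pyRange_one] at ha
      rw [hp]; simp only [Bool.and_eq_true, decide_eq_true_eq, not_and]; omega)]
    rw [List.filter_eq_self.mpr (fun a ha => by
      rw [PySem.List.mem_pyRange_one] at ha
      rw [hp]; simp only [Bool.and_eq_true, decide_eq_true_eq]; omega)]
    rw [List.filter_eq_nil_iff.mpr (fun a ha => by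
      rw [PySem.List.mem_pyRange_one] at ha
      rw [hp]; simp only [Bool.and_eq_true, decide_eq_true_eq, not_and]; omega)]
    simp

-- the master existence proposition: some 4-in-a-line in the n x n board
def Win (matrix : List (List Int)) : Prop :=
  ∃ i j : Int, 0 ≤ i ∧ i < (matrix.length : Int) ∧ 0 ≤ j ∧
    ((j + 3 < (matrix.length : Int) ∧
        cell matrix i (j+1) = cell matrix i j ∧
        cell matrix i (j+2) = cell matrix i j ∧
        cell matrix i (j+3) = cell matrix i j) ∨
     (i + 3 < (matrix.length : Int) ∧ j < (matrix.length : Int) ∧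
        cell matrix (i+1) j = cell matrix i j ∧
        cell matrix (i+2) j = cell matrix i j ∧
        cell matrix (i+3) j = cell matrix i j) ∨
     (i + 3 < (matrix.length : Int) ∧ j + 3 < (matrix.length : Int) ∧
        cell matrix (i+1) (j+1) = cell matrix i j ∧
        cell matrix (i+2) (j+2) = cell matrix i j ∧
        cell matrix (i+3) (j+3) = cell matrix i j) ∨
     (3 ≤ i ∧ i < (matrix.length : Int) ∧ j + 3 < (matrix.length : Int) ∧
        cell matrix (i-1) (j+1) = cell matrix i j ∧
        cell matrix (i-2) (j+2) = cell matrix i j ∧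
        cell matrix (i-3) (j+3) = cell matrix i j))


theorem row_iff (m : List (List Int)) (n i : Int) :
    hasRun (rowLine m n i) = true ↔
      ∃ t : Int, 0 ≤ t ∧ t + 3 < n ∧ cell m i (t+1) = cell m i t ∧
        cell m i (t+2) = cell m i t ∧ cell m i (t+3) = cell m i t := by
  rw [hasRun_iff, rowLine, Run4_map_pyRange]

theorem col_iff (m : List (List Int)) (n j : Int) :
    hasRun (colLine m n j) = true ↔
      ∃ t : Int, 0 ≤ t ∧ t + 3 < n ∧ cell m (t+1) j = cell m t j ∧
        cell m (t+2) j = cell m t j ∧ cell m (t+3) j = cell m t j := by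
  rw [hasRun_iff, colLine, Run4_map_pyRange]

theorem diag_iff (m : List (List Int)) (n s : Int) :
    hasRun (diagLine m n s) = true ↔
      ∃ t : Int, max 0 (s - n + 1) ≤ t ∧ t + 3 < min n (s + 1) ∧
        cell m (t+1) (t+1 - s + n - 1) = cell m t (t - s + n - 1) ∧
        cell m (t+2) (t+2 - s + n - 1) = cell m t (t - s + n - 1) ∧
        cell m (t+3) (t+3 - s + n - 1) = cell m t (t - s + n - 1) := by
  rw [hasRun_iff, diagLine,
    filter_interval n (s - n + 1) (s + 1) _
      (by intro i; congr 1 <;> rw [decide_eq_decide] <;> omega),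
    Run4_map_pyRange]

theorem anti_iff (m : List (List Int)) (n s : Int) :
    hasRun (antiLine m n s) = true ↔
      ∃ t : Int, max 0 (s - n + 1) ≤ t ∧ t + 3 < min n (s + 1) ∧
        cell m (t+1) (s - (t+1)) = cell m t (s - t) ∧
        cell m (t+2) (s - (t+2)) = cell m t (s - t) ∧
        cell m (t+3) (s - (t+3)) = cell m t (s - t) := by
  rw [hasRun_iff, antiLine,
    filter_interval n (s - n + 1) (s + 1) _
      (by intro i; rw [Bool.and_comm]; congr 1 <;> rw [decide_eq_decide] <;> omega),
    Run4_map_pyRange]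

theorem B_iff (matrix : List (List Int)) :
    checkioMe_alt matrix = true ↔ Win matrix := by
  simp only [checkioMe_alt, List.any_append, Bool.or_eq_true, List.any_eq_true,
    List.mem_map, List.mem_flatMap, List.mem_cons, List.mem_singleton,
    PySem.List.mem_pyRange_one]
  constructor
  · rintro ((⟨x, ⟨i, ⟨hi0, hin⟩, rfl⟩, hrun⟩ | ⟨x, ⟨j, ⟨hj0, hjn⟩, rfl⟩, hrun⟩) |
      ⟨x, ⟨s, ⟨hs0, hsn⟩, (rfl | rfl | h)⟩, hrun⟩)
    · obtain ⟨t, ht0, ht3, e1, e2, e3⟩ := (row_iff matrix _ i).mp hrun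
      exact ⟨i, t, hi0, hin, ht0, Or.inl ⟨ht3, e1, e2, e3⟩⟩
    · obtain ⟨t, ht0, ht3, e1, e2, e3⟩ := (col_iff matrix _ j).mp hrun
      exact ⟨t, j, ht0, by omega, hj0, Or.inr (Or.inl ⟨ht3, hjn, e1, e2, e3⟩)⟩
    · obtain ⟨t, hlo, hhi, e1, e2, e3⟩ := (diag_iff matrix _ s).mp hrun
      refine ⟨t, t - s + (matrix.length : Int) - 1, by omega, by omega, by omega,
        Or.inr (Or.inr (Or.inl ⟨by omega, by omega, ?_, ?_, ?_⟩))⟩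
      · rw [show t - s + (matrix.length : Int) - 1 + 1 = t + 1 - s + (matrix.length : Int) - 1 by ring]
        exact e1
      · rw [show t - s + (matrix.length : Int) - 1 + 2 = t + 2 - s + (matrix.length : Int) - 1 by ring]
        exact e2
      · rw [show t - s + (matrix.length : Int) - 1 + 3 = t + 3 - s + (matrix.length : Int) - 1 by ring]
        exact e3
    · obtain ⟨t, hlo, hhi, e1, e2, e3⟩ := (anti_iff matrix _ s).mp hrun
      refine ⟨t + 3, s - (t + 3), by omega, by omega, by omega,
        Or.inr (Or.inr (Or.inr ⟨by omega, by omega, by omega, ?_, ?_, ?_⟩))⟩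
      · rw [show t + 3 - 1 = t + 2 by ring, show s - (t + 3) + 1 = s - (t + 2) by ring]
        exact e2.trans e3.symm
      · rw [show t + 3 - 2 = t + 1 by ring, show s - (t + 3) + 2 = s - (t + 1) by ring]
        exact e1.trans e3.symm
      · rw [show t + 3 - 3 = t by ring, show s - (t + 3) + 3 = s - t by ring]
        exact e3.symm
    · exact absurd h (by simp)
  · rintro ⟨i, j, hi0, hin, hj0, (⟨hb, e1, e2, e3⟩ | ⟨hb, hjn, e1, e2, e3⟩ |
      ⟨hb1, hb2, e1, e2, e3⟩ | ⟨hb1, hb2, hb3, e1, e2, e3⟩)⟩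
    · exact Or.inl (Or.inl ⟨rowLine matrix _ i, ⟨i, ⟨hi0, hin⟩, rfl⟩,
        (row_iff matrix _ i).mpr ⟨j, hj0, hb, e1, e2, e3⟩⟩)
    · exact Or.inl (Or.inr ⟨colLine matrix _ j, ⟨j, ⟨hj0, hjn⟩, rfl⟩,
        (col_iff matrix _ j).mpr ⟨i, hi0, hb, e1, e2, e3⟩⟩)
    · refine Or.inr ⟨diagLine matrix _ (i - j + (matrix.length : Int) - 1),
        ⟨i - j + (matrix.length : Int) - 1, ⟨by omega, by omega⟩, Or.inl rfl⟩,
        (diag_iff matrix _ _).mpr ⟨i, by omega, by omega, ?_, ?_, ?_⟩⟩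
      · rw [show i + 1 - (i - j + (matrix.length : Int) - 1) + (matrix.length : Int) - 1 = j + 1 by ring,
          show i - (i - j + (matrix.length : Int) - 1) + (matrix.length : Int) - 1 = j by ring]
        exact e1
      · rw [show i + 2 - (i - j + (matrix.length : Int) - 1) + (matrix.length : Int) - 1 = j + 2 by ring,
          show i - (i - j + (matrix.length : Int) - 1) + (matrix.length : Int) - 1 = j by ring]
        exact e2
      · rw [show i + 3 - (i - j + (matrix.length : Int) - 1) + (matrix.length : Int) - 1 = j + 3 by ring,
          show i - (i - j + (matrix.length : Int) - 1) + (matrix.length : Int) - 1 = j by ring]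
        exact e3
    · refine Or.inr ⟨antiLine matrix _ (i + j),
        ⟨i + j, ⟨by omega, by omega⟩, Or.inr (Or.inl rfl)⟩,
        (anti_iff matrix _ _).mpr ⟨i - 3, by omega, by omega, ?_, ?_, ?_⟩⟩
      · rw [show i - 3 + 1 = i - 2 by ring, show i + j - (i - 2) = j + 2 by ring,
          show i + j - (i - 3) = j + 3 by ring]
        exact e2.trans e3.symm
      · rw [show i - 3 + 2 = i - 1 by ring, show i + j - (i - 1) = j + 1 by ring,
          show i + j - (i - 3) = j + 3 by ring]
        exact e1.trans e3.symm
      · rw [show i - 3 + 3 = i by ring, show i + j - i = j by ring,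
          show i + j - (i - 3) = j + 3 by ring]
        exact e3.symm

theorem list4 : PySem.List.pyRange 0 4 1 = [0, 1, 2, 3] := by decide

theorem setlen4 (w x y z : Int) :
    (PySem.Set.len (PySem.Set.ofList [w, x, y, z]) == 1) = true ↔ (x = w ∧ y = w ∧ z = w) := by
  by_cases hx : x = w <;> by_cases hy : y = w <;> by_cases hz : z = w <;>
    simp_all [PySem.Set.ofList, PySem.Set.add, PySem.Set.contains, PySem.Set.len,
      PySem.Set.empty, List.foldl] <;> split_ifs <;> simp_all

theorem win4_iff (p : Int → Bool) (g : Int → Int) (Q : Prop)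
    (hQ : Q ↔ (p 0 = true ∧ p 1 = true ∧ p 2 = true ∧ p 3 = true)) :
    ((PySem.Set.len (PySem.Set.ofList (((PySem.List.pyRange 0 4 1).filter p).map g)) == 1)
      && ((((PySem.List.pyRange 0 4 1).filter p).map g).length == 4)) = true ↔
      (Q ∧ g 1 = g 0 ∧ g 2 = g 0 ∧ g 3 = g 0) := by
  rw [list4]
  by_cases hq : Q
  · obtain ⟨p0, p1, p2, p3⟩ := hQ.mp hq
    have hf : ([0, 1, 2, 3] : List Int).filter p = [0, 1, 2, 3] :=
      List.filter_eq_self.mpr (by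
        intro a ha
        simp only [List.mem_cons, List.not_mem_nil, or_false] at ha
        rcases ha with rfl | rfl | rfl | rfl <;> assumption)
    rw [hf]
    simp only [List.map_cons, List.map_nil]
    rw [Bool.and_eq_true]
    constructor
    · rintro ⟨h1, _⟩
      exact ⟨hq, (setlen4 _ _ _ _).mp h1⟩
    · rintro ⟨_, e⟩
      exact ⟨(setlen4 _ _ _ _).mpr e, by simp⟩
  · have hlen : (([0, 1, 2, 3] : List Int).filter p).length ≠ 4 := by
      intro hl
      have hsub : ([0, 1, 2, 3] : List Int).filter p = [0, 1, 2, 3] :=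
        List.Sublist.eq_of_length List.filter_sublist (by simp [hl])
      have h3 : ∀ k ∈ ([0, 1, 2, 3] : List Int), p k = true := by
        intro k hk
        rw [← hsub] at hk
        exact List.of_mem_filter hk
      exact hq (hQ.mpr ⟨h3 0 (by simp), h3 1 (by simp), h3 2 (by simp), h3 3 (by simp)⟩)
    constructor
    · intro h
      rw [Bool.and_eq_true] at h
      obtain ⟨_, h2⟩ := h
      rw [List.length_map] at h2
      exact absurd (by simpa using h2) hlen
    · rintro ⟨hq', _⟩
      exact absurd hq' hq

theorem windowA_iff (m : List (List Int)) (n i j : Int) :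
    windowA m n i j = true ↔
      ((j + 3 < n ∧ cell m i (j+1) = cell m i j ∧ cell m i (j+2) = cell m i j ∧
          cell m i (j+3) = cell m i j) ∨
       (i + 3 < n ∧ cell m (i+1) j = cell m i j ∧ cell m (i+2) j = cell m i j ∧
          cell m (i+3) j = cell m i j) ∨
       (i + 3 < n ∧ j + 3 < n ∧ cell m (i+1) (j+1) = cell m i j ∧
          cell m (i+2) (j+2) = cell m i j ∧ cell m (i+3) (j+3) = cell m i j) ∨
       (j + 3 < n ∧ 0 ≤ i - 3 ∧ cell m (i-1) (j+1) = cell m i j ∧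
          cell m (i-2) (j+2) = cell m i j ∧ cell m (i-3) (j+3) = cell m i j)) := by
  have h1 := win4_iff (fun k => decide (j + k < n)) (fun k => cell m i (j + k))
    (j + 3 < n) (by simp only [decide_eq_true_eq]; omega)
  have h2 := win4_iff (fun k => decide (i + k < n)) (fun k => cell m (i + k) j)
    (i + 3 < n) (by simp only [decide_eq_true_eq]; omega)
  have h3 := win4_iff (fun k => decide (i + k < n) && decide (j + k < n))
    (fun k => cell m (i + k) (j + k)) (i + 3 < n ∧ j + 3 < n)
    (by simp only [Bool.and_eq_true, decide_eq_true_eq]; omega)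
  have h4 := win4_iff (fun k => decide (j + k < n) && decide (i - k ≥ 0))
    (fun k => cell m (i - k) (j + k)) (j + 3 < n ∧ 0 ≤ i - 3)
    (by simp only [Bool.and_eq_true, decide_eq_true_eq, ge_iff_le]; omega)
  simp only [windowA, h1, h2, h3, h4, add_zero, sub_zero, and_assoc]
  split_ifs <;> simp_all

theorem A_iff (matrix : List (List Int)) :
    checkioMe matrix = true ↔ Win matrix := by
  simp only [checkioMe, List.any_eq_true, PySem.List.mem_pyRange_one]
  constructor
  · rintro ⟨i, ⟨hi0, hin⟩, j, ⟨hj0, hjn⟩, hw⟩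
    rcases (windowA_iff matrix _ i j).mp hw with
      ⟨hb, e1, e2, e3⟩ | ⟨hb, e1, e2, e3⟩ | ⟨hb1, hb2, e1, e2, e3⟩ | ⟨hb1, hb2, e1, e2, e3⟩
    · exact ⟨i, j, hi0, hin, hj0, Or.inl ⟨hb, e1, e2, e3⟩⟩
    · exact ⟨i, j, hi0, hin, hj0, Or.inr (Or.inl ⟨hb, hjn, e1, e2, e3⟩)⟩
    · exact ⟨i, j, hi0, hin, hj0, Or.inr (Or.inr (Or.inl ⟨hb1, hb2, e1, e2, e3⟩))⟩
    · exact ⟨i, j, hi0, hin, hj0, Or.inr (Or.inr (Or.inr ⟨by omega, hin, hb1, e1, e2, e3⟩))⟩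
  · rintro ⟨i, j, hi0, hin, hj0, hd⟩
    rcases hd with
      ⟨hb, e1, e2, e3⟩ | ⟨hb, hjn, e1, e2, e3⟩ | ⟨hb1, hb2, e1, e2, e3⟩ |
        ⟨hb1, hb2, hb3, e1, e2, e3⟩
    · exact ⟨i, ⟨hi0, hin⟩, j, ⟨hj0, by omega⟩,
        (windowA_iff matrix _ i j).mpr (Or.inl ⟨hb, e1, e2, e3⟩)⟩
    · exact ⟨i, ⟨hi0, hin⟩, j, ⟨hj0, hjn⟩,
        (windowA_iff matrix _ i j).mpr (Or.inr (Or.inl ⟨hb, e1, e2, e3⟩))⟩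
    · exact ⟨i, ⟨hi0, hin⟩, j, ⟨hj0, by omega⟩,
        (windowA_iff matrix _ i j).mpr (Or.inr (Or.inr (Or.inl ⟨hb1, hb2, e1, e2, e3⟩)))⟩
    · exact ⟨i, ⟨hi0, hin⟩, j, ⟨hj0, by omega⟩,
        (windowA_iff matrix _ i j).mpr (Or.inr (Or.inr (Or.inr ⟨hb3, by omega, e1, e2, e3⟩)))⟩

-- ===== VERDICT (by name: the statement is the Claim_ definition above) =====
theorem checkioMe_spec : Claim_equal_checkioMe := by
  intro matrix _hdom _hpre
  unfold Spec_checkioMe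
  rcases h : checkioMe_alt matrix
  · rcases h2 : checkioMe matrix
    · rfl
    · exact absurd ((B_iff matrix).mpr ((A_iff matrix).mp h2)) (by simp [h])
  · exact (A_iff matrix).mpr ((B_iff matrix).mp h)
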